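-- pv_equiv track=rewrite | github.com/mwojc2137/prg-basics | 04-Functions/t7p28.py | f
-- ===== SOURCE A (Python) =====
-- def f(dice):
--     dice = str(dice)
--     in_row = 0
--     max_in_row = 0
--     n = 1
--     while n < len(dice):
--         if dice[n] == dice[n-1]:
--             in_row += 1
--         if max_in_row < in_row:
--             max_in_row = in_row
--             result = dice[n]
--         elif dice[n] != dice[n-1]:
--             in_row = 0
--         n += 1
--     return result
-- ===== SOURCE B (Python) =====
-- def f(dice):
--     s = str(dice)
--     runs = []
--     for ch in s:
--         if runs and runs[-1][0] == ch:
--             runs[-1][1] += 1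
--         else:
--             runs.append([ch, 1])
--     best = 1
--     for ch, n in runs:
--         if n > best:
--             best = n
--             result = ch
--     return result
-- ===== Notes on version B (the rewrite author's own statement) =====
-- stated objective: alternative
-- what changed: A fuses run counting and maximum tracking into one index loop with a trailing-run counter and a quirky elif reset; B first builds an explicit run-length encoding of str(dice) in one pass, then scans the (char, length) runs with a strict-greater selection starting at best=1.
import Mathlib
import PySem

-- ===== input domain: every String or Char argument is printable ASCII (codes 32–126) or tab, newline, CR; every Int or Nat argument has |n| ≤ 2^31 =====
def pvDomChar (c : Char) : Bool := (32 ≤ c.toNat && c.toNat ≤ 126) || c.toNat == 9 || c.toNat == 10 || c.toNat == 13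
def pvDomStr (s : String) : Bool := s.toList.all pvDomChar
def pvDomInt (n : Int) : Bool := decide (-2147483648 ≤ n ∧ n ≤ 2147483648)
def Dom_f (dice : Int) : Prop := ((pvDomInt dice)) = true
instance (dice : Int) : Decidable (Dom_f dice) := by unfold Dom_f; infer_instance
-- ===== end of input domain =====

-- B replaces A's fused index loop (trailing-run counter with a quirky elif reset) by an
-- explicit run-length encoding pass followed by a strict-max selection scan (alternative
-- decomposition, same cost). Return-value equivalence; neither mutates its argument.

-- ===== PORT A =====
-- A's while loop over n = 1 .. len(dice)-1; indices are always in range, ported with getD.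
-- Python's unbound `result` is ported as Option Char (none = UnboundLocalError, excluded by Pre_f).
def fLoop (cs : List Char) (n inRow maxInRow : Nat) (result : Option Char) : Option Char :=
  if h : n < cs.length then
    let c := cs.getD n ' '
    let p := cs.getD (n - 1) ' '
    let inRow' := if c == p then inRow + 1 else inRow
    if maxInRow < inRow' then fLoop cs (n + 1) inRow' inRow' (some c)
    else if c != p then fLoop cs (n + 1) 0 maxInRow result
    else fLoop cs (n + 1) inRow' maxInRow result
  else result
termination_by cs.length - n
decreasing_by all_goals omega

def f (dice : Int) : String :=
  match fLoop (PySem.Int.toStr dice).toList 1 0 0 none with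
  | some c => String.ofList [c]
  | none => ""   -- unreachable under Pre_f: Python raises UnboundLocalError here

-- ===== PORT B =====
-- Source B first loop body: extend the last run or start a new one.
def buildRuns (runs : List (Char × Nat)) (ch : Char) : List (Char × Nat) :=
  match runs.getLast? with
  | some (c, k) => if c == ch then runs.dropLast ++ [(c, k + 1)] else runs ++ [(ch, 1)]
  | none => [(ch, 1)]

-- Source B second loop: strict-max selection over the runs.
def selectRun : List (Char × Nat) → Nat → Option Char → Option Char
  | [], _, res => res
  | (c, n) :: rest, best, res =>
      if best < n then selectRun rest n (some c) else selectRun rest best res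

def f_alt (dice : Int) : String :=
  let runs := (PySem.Int.toStr dice).toList.foldl buildRuns []
  match selectRun runs 1 none with
  | some c => String.ofList [c]
  | none => ""   -- unreachable under Pre_f: Python raises UnboundLocalError here

-- ===== PRECONDITION & SPEC =====
-- Pre_f excludes exactly the inputs whose decimal string has no two equal adjacent characters:
-- there A's `result` is never assigned and Python raises UnboundLocalError (B raises the same).
def Pre_f (dice : Int) : Prop :=
  (((PySem.Int.toStr dice).toList.zip (PySem.Int.toStr dice).toList.tail).any
    (fun p => p.1 == p.2)) = true
instance (dice : Int) : Decidable (Pre_f dice) := by unfold Pre_f; infer_instance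

def pvWitness_f : Int := 1224

def Spec_f (dice : Int) (out : String) : Prop := out = f_alt dice
instance (dice : Int) (out : String) : Decidable (Spec_f dice out) := by unfold Spec_f; infer_instance

-- ===== CLAIM (what is proved, stated in full; the proofs are below) =====
def Claim_equal_f : Prop := ∀ (dice : Int), Dom_f dice → Pre_f dice → Spec_f dice (f dice)

-- ===== LEMMAS AND PROOFS =====

-- Structural (previous-char, suffix) reformulation of A's index loop.
def aStep (p : Char) (l : List Char) (inRow maxIR : Nat) (res : Option Char) : Option Char :=
  match l with
  | [] => res
  | c :: rest =>
      let inRow' := if c == p then inRow + 1 else inRow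
      if maxIR < inRow' then aStep c rest inRow' inRow' (some c)
      else if c != p then aStep c rest 0 maxIR res
      else aStep c rest inRow' maxIR res

-- Forward run-length encoding (reference form of Source B's first loop).
def rle : List Char → List (Char × Nat)
  | [] => []
  | c :: cs =>
      (c, 1 + (cs.takeWhile (· == c)).length) :: rle (cs.dropWhile (· == c))
termination_by l => l.length
decreasing_by
  simpa using Nat.lt_succ_of_le (List.length_dropWhile_le _ _)

theorem fLoop_eq_aStep (cs : List Char) (n inRow maxIR : Nat) (res : Option Char)
    (hn : 1 ≤ n) :
    fLoop cs n inRow maxIR res = aStep (cs.getD (n - 1) ' ') (cs.drop n) inRow maxIR res := by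
  by_cases h : n < cs.length
  · rw [fLoop]
    have hd : cs.drop n = cs.getD n ' ' :: cs.drop (n + 1) := by
      rw [List.getD_eq_getElem _ _ h, List.drop_eq_getElem_cons h]
    rw [hd, aStep]
    simp only [dif_pos h]
    have ih1 := fLoop_eq_aStep cs (n + 1) (if cs.getD n ' ' == cs.getD (n-1) ' ' then inRow + 1 else inRow)
      (if cs.getD n ' ' == cs.getD (n-1) ' ' then inRow + 1 else inRow) (some (cs.getD n ' ')) (by omega)
    have ih2 := fLoop_eq_aStep cs (n + 1) 0 maxIR res (by omega)
    have ih3 := fLoop_eq_aStep cs (n + 1) (if cs.getD n ' ' == cs.getD (n-1) ' ' then inRow + 1 else inRow) maxIR res (by omega)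
    simp only [Nat.add_sub_cancel] at ih1 ih2 ih3
    split_ifs with h1 h2 <;> simp_all
  · rw [fLoop, aStep.eq_def]
    simp [List.drop_eq_nil_of_le (by omega : cs.length ≤ n), h]
termination_by cs.length - n
decreasing_by all_goals omega

-- Continuation after a full run has been consumed.
def cont (rest : List Char) (mx : Nat) (res : Option Char) : Option Char :=
  match rest with
  | [] => res
  | c :: tail => aStep c tail 0 mx res

theorem run_step (p : Char) (rest : List Char)
    (hrest : ∀ c, rest.head? = some c → (c == p) = false) :
    ∀ (j i mx : Nat) (res : Option Char), i ≤ mx →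
    aStep p (List.replicate j p ++ rest) i mx res =
      cont rest (Nat.max mx (i + j)) (if mx < i + j then some p else res)
  | 0, i, mx, res, hle => by
      match rest with
      | [] =>
          simp [aStep, cont, show ¬ mx < i by omega]
      | c :: tail =>
          have hc : ¬ (c = p) := by simpa using hrest c rfl
          simp [aStep, cont, hc, Nat.max_eq_left hle, show ¬ mx < i by omega]
  | j + 1, i, mx, res, hle => by
      rw [List.replicate_succ, List.cons_append]
      by_cases h1 : mx < i + 1
      · have hmx : mx = i := by omega
        have ih := run_step p rest hrest j (i + 1) (i + 1) (some p) (le_refl _)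
        simp only [aStep, beq_self_eq_true, if_true, if_pos h1]
        rw [ih]
        have m1 : Nat.max (i + 1) (i + 1 + j) = i + 1 + j := Nat.max_eq_right (by omega)
        have m2 : Nat.max mx (i + (j + 1)) = i + (j + 1) := Nat.max_eq_right (by omega)
        have e1 : Nat.max (i + 1) (i + 1 + j) = Nat.max mx (i + (j + 1)) := by
          rw [m1, m2]; omega
        have e2 : (if i + 1 < i + 1 + j then some p else some p)
            = (if mx < i + (j + 1) then some p else res) := by
          rw [if_pos (show mx < i + (j + 1) by omega)]
          split <;> rfl
        rw [e1, e2]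
      · have h2 : i + 1 ≤ mx := by omega
        have ih := run_step p rest hrest j (i + 1) mx res h2
        simp only [aStep, beq_self_eq_true, if_true, if_neg h1, bne_self_eq_false,
          Bool.false_eq_true, if_false]
        rw [ih]
        have e3 : i + 1 + j = i + (j + 1) := by omega
        rw [e3]

theorem dropWhile_head_not {α : Type} (q : α → Bool) :
    ∀ (l : List α) (c : α), (l.dropWhile q).head? = some c → q c = false := by
  intro l
  induction l with
  | nil => intro c h; simp [List.dropWhile] at h
  | cons a as ih =>
      intro c h
      rw [List.dropWhile_cons] at h
      by_cases ha : q a = true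
      · exact ih c (by simpa [ha] using h)
      · simp [ha] at h; subst h; simpa using ha

theorem takeWhile_eq_replicate (p : Char) (cs : List Char) :
    cs.takeWhile (· == p) = List.replicate (cs.takeWhile (· == p)).length p := by
  apply List.eq_replicate_of_mem
  intro b hb
  have := List.mem_takeWhile_imp hb
  simpa using this

theorem aStep_eq_selectRun : ∀ (cs : List Char) (p : Char) (mx : Nat) (res : Option Char),
    aStep p cs 0 mx res = selectRun (rle (p :: cs)) (mx + 1) res := by
  intro cs
  induction hn : cs.length using Nat.strong_induction_on generalizing cs with
  | _ n ih =>
    intro p mx res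
    set j := (cs.takeWhile (· == p)).length with hj
    have hsplit : List.replicate j p ++ cs.dropWhile (· == p) = cs := by
      rw [hj, ← takeWhile_eq_replicate]
      exact List.takeWhile_append_dropWhile
    have hhead : ∀ c, (cs.dropWhile (· == p)).head? = some c → (c == p) = false := by
      intro c hc
      simpa using dropWhile_head_not (· == p) cs c hc
    have hrs := run_step p (cs.dropWhile (· == p)) hhead j 0 mx res (Nat.zero_le _)
    rw [hsplit] at hrs
    rw [hrs, rle, ← hj]
    cases hrest : cs.dropWhile (· == p) with
    | nil =>
        by_cases h : mx < j
        · simp [cont, rle, selectRun, show mx + 1 < 1 + j by omega, h]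
        · simp [cont, rle, selectRun, show ¬ (mx + 1 < 1 + j) by omega, h]
    | cons c tail =>
        have hlt : tail.length < n := by
          have h1 : (cs.dropWhile (· == p)).length ≤ cs.length := List.length_dropWhile_le _ _
          rw [hrest] at h1; simp at h1; omega
        have ihtail := ih tail.length hlt tail rfl c (Nat.max mx j) (if mx < j then some p else res)
        simp only [cont, Nat.zero_add]
        rw [ihtail, selectRun]
        by_cases h : mx < j
        · have m : Nat.max mx j = j := Nat.max_eq_right (le_of_lt h)
          rw [if_pos (show mx + 1 < 1 + j by omega), if_pos h, m, Nat.add_comm 1 j]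
        · have m : Nat.max mx j = mx := Nat.max_eq_left (by omega)
          rw [if_neg (show ¬ (mx + 1 < 1 + j) by omega), if_neg h, m]

theorem foldl_buildRuns_aux (cs : List Char) :
    ∀ (acc : List (Char × Nat)) (c : Char) (k : Nat),
    List.foldl buildRuns (acc ++ [(c, k)]) cs =
      acc ++ (c, k + (cs.takeWhile (· == c)).length) :: rle (cs.dropWhile (· == c)) := by
  induction cs with
  | nil => intro acc c k; simp [rle]
  | cons d cs' ih =>
      intro acc c k
      simp only [List.foldl_cons]
      have hb : buildRuns (acc ++ [(c, k)]) d =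
          if c == d then acc ++ [(c, k + 1)] else (acc ++ [(c, k)]) ++ [(d, 1)] := by
        simp [buildRuns]
      by_cases hcd : c == d
      · have hdc : (d == c) = true := by
          simp at hcd; simp [hcd]
        rw [hb, if_pos hcd, ih acc c (k + 1)]
        simp [hdc]
        omega
      · have hdc : (d == c) = false := by
          simp at hcd ⊢; exact fun h => hcd h.symm
        rw [hb, if_neg hcd, ih (acc ++ [(c, k)]) d 1]
        simp [hdc, rle]

theorem foldl_buildRuns_eq_rle (cs : List Char) :
    List.foldl buildRuns [] cs = rle cs := by
  match cs with
  | [] => simp [rle]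
  | d :: cs' =>
      have h0 : buildRuns [] d = [(d, 1)] := by simp [buildRuns]
      have := foldl_buildRuns_aux cs' ([] : List (Char × Nat)) d 1
      simp only [List.nil_append] at this
      simp only [List.foldl_cons, h0]
      rw [this, rle]

-- ===== VERDICT (by name: the statement is the Claim_ definition above) =====
theorem f_spec : Claim_equal_f := by
  intro dice _ _
  unfold Spec_f f f_alt
  rw [foldl_buildRuns_eq_rle]
  match hcs : (PySem.Int.toStr dice).toList with
  | [] => simp [fLoop, rle, selectRun]
  | c :: cs' =>
      have h1 := fLoop_eq_aStep (c :: cs') 1 0 0 none (le_refl 1)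
      have h2 := aStep_eq_selectRun cs' c 0 none
      simp only [List.getD, List.drop_one, List.tail_cons, List.getElem?_cons_zero,
        Option.getD_some, Nat.sub_self] at h1
      rw [h1, h2]
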